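-- pv_equiv track=rewrite | github.com/uservan/cross_domain | verl/verl/utils/reward_score/puzzle_tasks/hitori/verifier.py | is_valid_hitori
-- ===== SOURCE A (Python) =====
-- def is_valid_hitori(board):
--     """
--     Verify if a hitori solution follows the rules.
--     """
--     size = len(board)
--     half_size = size // 2
--
--     # Check if each row and column follows the rules
--     def is_valid_unit(unit):
--         return unit.count(0) <= half_size and unit.count(1) <= half_size and all(
--             unit[i] != unit[i + 1] or unit[i + 1] != unit[i + 2]
--             for i in range(len(unit) - 2)
--         )
--
--     # Verify all rows
--     for row in board:
--         if not is_valid_unit(row):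
--             return 0
--
--     # Verify all columns
--     for col in zip(*board):
--         if not is_valid_unit(list(col)):
--             return 0
--
--     return 1
-- ===== SOURCE B (Python) =====
-- def is_valid_hitori(board):
--     """
--     Verify if a hitori solution follows the rules.
--     """
--     half_size = len(board) // 2
--
--     # Run-length encode a unit with a two-pointer scan: list of (value, run length).
--     def runs(unit):
--         out = []
--         i, n = 0, len(unit)
--         while i < n:
--             j = i
--             while j < n and unit[j] == unit[i]:
--                 j += 1
--             out.append((unit[i], j - i))
--             i = j
--         return out
--
--     # A unit is valid iff every run is shorter than 3 and the total length of the
--     # runs of 0 (resp. 1) is at most half_size.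
--     def ok(unit):
--         rs = runs(unit)
--         return (all(l < 3 for _, l in rs)
--                 and sum(l for v, l in rs if v == 0) <= half_size
--                 and sum(l for v, l in rs if v == 1) <= half_size)
--
--     cols = [list(c) for c in zip(*board)]
--     return 1 if all(ok(u) for u in board + cols) else 0
-- ===== Notes on version B (the rewrite author's own statement) =====
-- stated objective: alternative
-- what changed: Each unit is run-length encoded by a two-pointer scan into (value, run length) pairs; validity is read off the encoding (every run shorter than 3, runs of 0 and of 1 each totalling at most half the size), and rows plus zip-columns are checked with one all(...) over their concatenation, replacing A's two .count scans and indexed triple comparison per unit.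
import Mathlib
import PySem

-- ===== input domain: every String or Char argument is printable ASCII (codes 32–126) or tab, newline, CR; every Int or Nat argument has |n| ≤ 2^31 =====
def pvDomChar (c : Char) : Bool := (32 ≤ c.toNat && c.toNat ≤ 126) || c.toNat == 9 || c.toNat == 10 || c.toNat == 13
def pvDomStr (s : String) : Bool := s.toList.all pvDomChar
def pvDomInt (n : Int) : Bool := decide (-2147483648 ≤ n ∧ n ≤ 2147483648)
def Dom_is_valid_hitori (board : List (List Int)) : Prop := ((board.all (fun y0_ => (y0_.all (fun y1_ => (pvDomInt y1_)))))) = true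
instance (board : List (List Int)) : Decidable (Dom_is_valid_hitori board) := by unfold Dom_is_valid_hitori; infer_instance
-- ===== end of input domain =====

-- B replaces A's per-unit checks (two .count scans plus an indexed triple comparison) by a
-- run-length encoding of each unit: every run must be shorter than 3 and the runs of 0 / of 1
-- must total at most half the board size; an alternative decomposition, same results.

-- ===== PORT A =====
-- zip(*board): columns up to the minimum row length (hand port of zip; exact since
-- every r.getD j 0 has j < r.length, so the default is never used)
def pvNcols (rows : List (List Int)) : Nat :=
  match rows with
  | [] => 0
  | r :: rs => rs.foldl (fun m r' => min m r'.length) r.length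

def pvColAt (rows : List (List Int)) (j : Nat) : List Int :=
  rows.map (fun r => r.getD j 0)

-- is_valid_unit of A: unit.count(0) <= half and unit.count(1) <= half and all(...)
def pvIsValidUnitA (half : Int) (unit : List Int) : Bool :=
  decide ((PySem.List.count unit 0 : Int) ≤ half) &&
  decide ((PySem.List.count unit 1 : Int) ≤ half) &&
  (PySem.List.pyRange 0 ((unit.length : Int) - 2) 1).all (fun i =>
    decide (PySem.List.pyGet? unit i ≠ PySem.List.pyGet? unit (i + 1)) ||
    decide (PySem.List.pyGet? unit (i + 1) ≠ PySem.List.pyGet? unit (i + 2)))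

def is_valid_hitori (board : List (List Int)) : Int :=
  let half := PySem.Int.floordiv (board.length : Int) 2
  if board.all (fun row => pvIsValidUnitA half row) then
    if (List.range (pvNcols board)).all (fun j => pvIsValidUnitA half (pvColAt board j)) then 1
    else 0
  else 0

-- ===== PORT B =====
-- run-length encoding by a two-pointer scan: the inner advance loop (j moves past the
-- elements equal to unit[i]) is takeWhile/dropWhile, exact for that loop
def pvRuns (u : List Int) : List (Int × Nat) :=
  match u with
  | [] => []
  | x :: r =>
    (x, 1 + (r.takeWhile (fun y => y == x)).length) :: pvRuns (r.dropWhile (fun y => y == x))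
termination_by u.length
decreasing_by
  have := List.length_dropWhile_le (fun y => y == x) r
  simp; omega

-- sum(l for v, l in rs if v == w)
def pvSumFor (w : Int) (rs : List (Int × Nat)) : Nat :=
  ((rs.filter (fun p => p.1 == w)).map (fun p => p.2)).sum

def pvOkB (half : Int) (u : List Int) : Bool :=
  let rs := pvRuns u
  rs.all (fun p => decide (p.2 < 3)) &&
  decide ((pvSumFor 0 rs : Int) ≤ half) &&
  decide ((pvSumFor 1 rs : Int) ≤ half)

def is_valid_hitori_alt (board : List (List Int)) : Int :=
  let half := PySem.Int.floordiv (board.length : Int) 2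
  let cols := (List.range (pvNcols board)).map (fun j => pvColAt board j)
  if (board ++ cols).all (fun u => pvOkB half u) then 1 else 0

-- ===== PRECONDITION & SPEC =====
def Spec_is_valid_hitori (board : List (List Int)) (out : Int) : Prop := out = is_valid_hitori_alt board
instance (board : List (List Int)) (out : Int) : Decidable (Spec_is_valid_hitori board out) := by unfold Spec_is_valid_hitori; infer_instance

-- ===== CLAIM =====
def Claim_equal_is_valid_hitori : Prop := ∀ (board : List (List Int)), Dom_is_valid_hitori board → Spec_is_valid_hitori board (is_valid_hitori board)

-- ===== LEMMAS AND PROOFS =====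

theorem pvRuns_nil : pvRuns [] = [] := by simp [pvRuns.eq_def]

theorem pvRuns_cons (x : Int) (r : List Int) :
    pvRuns (x :: r) =
      (x, 1 + (r.takeWhile (fun y => y == x)).length) :: pvRuns (r.dropWhile (fun y => y == x)) := by
  rw [pvRuns.eq_def]

theorem pvSumFor_cons (w a : Int) (L : Nat) (rs : List (Int × Nat)) :
    pvSumFor w ((a, L) :: rs) = (if a = w then L else 0) + pvSumFor w rs := by
  by_cases h : a = w <;> simp [pvSumFor, h]

-- structural "no three equal in a row" check (characterises A's indexed triple test)
def pvChainOk : List Int → Bool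
  | a :: b :: c :: r => (decide (a ≠ b) || decide (b ≠ c)) && pvChainOk (b :: c :: r)
  | _ => true

theorem pvChainOk_cons_of_ne (p x : Int) (r : List Int) (h : p ≠ x) :
    pvChainOk (p :: x :: r) = pvChainOk (x :: r) := by
  cases r with
  | nil => simp [pvChainOk]
  | cons c r' => simp [pvChainOk, h]

-- the Nat-indexed form of A's triple check
def pvQ (u : List Int) (k : Nat) : Bool :=
  decide (u[k]? ≠ u[k + 1]?) || decide (u[k + 1]? ≠ u[k + 2]?)

theorem pvQ_cons (a : Int) (u : List Int) (k : Nat) : pvQ (a :: u) (k + 1) = pvQ u k := by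
  simp [pvQ]

theorem pvRangeAll_eq_chainOk (u : List Int) :
    (List.range (u.length - 2)).all (pvQ u) = pvChainOk u := by
  match u with
  | [] => simp [pvChainOk]
  | [a] => simp [pvChainOk]
  | [a, b] => simp [pvChainOk]
  | a :: b :: c :: r =>
    have ih := pvRangeAll_eq_chainOk (b :: c :: r)
    have hlen : (a :: b :: c :: r).length - 2 = ((b :: c :: r).length - 2) + 1 := by
      simp
    have hfun : (pvQ (a :: b :: c :: r) ∘ Nat.succ) = pvQ (b :: c :: r) :=
      funext (fun k => pvQ_cons a (b :: c :: r) k)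
    rw [hlen, List.range_succ_eq_map, List.all_cons, List.all_map, hfun, ih]
    have hQ0 : pvQ (a :: b :: c :: r) 0 = (decide (a ≠ b) || decide (b ≠ c)) := by
      simp [pvQ]
    rw [hQ0]
    rfl
termination_by u.length

theorem pvIdxAll_eq_chainOk (u : List Int) :
    ((PySem.List.pyRange 0 ((u.length : Int) - 2) 1).all (fun i =>
      decide (PySem.List.pyGet? u i ≠ PySem.List.pyGet? u (i + 1)) ||
      decide (PySem.List.pyGet? u (i + 1) ≠ PySem.List.pyGet? u (i + 2)))) = pvChainOk u := by
  rw [PySem.List.pyRange_one, List.all_map]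
  have hN : ((u.length : Int) - 2 - 0).toNat = u.length - 2 := by omega
  rw [hN, ← pvRangeAll_eq_chainOk u]
  have hfun : ((fun i =>
      decide (PySem.List.pyGet? u i ≠ PySem.List.pyGet? u (i + 1)) ||
      decide (PySem.List.pyGet? u (i + 1) ≠ PySem.List.pyGet? u (i + 2))) ∘
        (fun k : Nat => (0 : Int) + (k : Int))) = pvQ u := by
    funext k
    have h1 : (0 : Int) + (k : Int) = ((k : Nat) : Int) := by ring
    have h2 : (k : Int) + 1 = (((k + 1 : Nat)) : Int) := by push_cast; ring
    have h3 : (k : Int) + 2 = (((k + 2 : Nat)) : Int) := by push_cast; ring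
    simp only [Function.comp_apply, h1, h2, h3, PySem.List.pyGet?_natCast]
    rfl
  rw [hfun]

-- head of dropWhile fails the predicate
theorem pv_dropWhile_head (x a : Int) (r s : List Int)
    (h : r.dropWhile (fun y => y == x) = a :: s) : a ≠ x := by
  induction r with
  | nil => simp [List.dropWhile] at h
  | cons y r' ih =>
    by_cases hy : y = x
    · rw [List.dropWhile_cons_of_pos (by simp [hy])] at h; exact ih h
    · rw [List.dropWhile_cons_of_neg (by simp [hy])] at h
      cases h; exact hy

-- counts: count of v in u equals the total length of the v-runs
theorem pv_count_runs (u : List Int) (v : Int) :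
    u.count v = pvSumFor v (pvRuns u) := by
  match u with
  | [] => simp [pvRuns_nil, pvSumFor]
  | x :: r =>
    have hall : ∀ b ∈ r.takeWhile (fun y => y == x), b = x := fun b hb => by
      simpa using List.mem_takeWhile_imp hb
    have ih := pv_count_runs (r.dropWhile (fun y => y == x)) v
    rw [pvRuns_cons, pvSumFor_cons, ← ih]
    have hr : (r.takeWhile (fun y => y == x)) ++ (r.dropWhile (fun y => y == x)) = r :=
      List.takeWhile_append_dropWhile
    have htc : (r.takeWhile (fun y => y == x)).count v =
        if x = v then (r.takeWhile (fun y => y == x)).length else 0 := by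
      by_cases h : x = v
      · rw [if_pos h]
        exact List.count_eq_length.mpr (fun b hb => (h ▸ (hall b hb)).symm)
      · rw [if_neg h]
        exact List.count_eq_zero.mpr (fun hmem => h (hall v hmem).symm)
    rw [show (x :: r) = x :: ((r.takeWhile (fun y => y == x)) ++ (r.dropWhile (fun y => y == x)))
        from by rw [hr]]
    simp only [List.count_cons, List.count_append, htc]
    by_cases h : x = v
    · subst h
      simp
      omega
    · simp [h, fun hh : v = x => h hh.symm]
termination_by u.length
decreasing_by
  have := List.length_dropWhile_le (fun y => y == x) r
  simp; omega

-- chains: skipping the first maximal run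
theorem pv_chain_split (x : Int) (t d : List Int) (hall : ∀ b ∈ t, b = x)
    (hd : ∀ a s, d = a :: s → a ≠ x) :
    pvChainOk (x :: (t ++ d)) = (decide (1 + t.length < 3) && pvChainOk d) := by
  match t with
  | [] =>
    cases hdd : d with
    | nil => simp [pvChainOk]
    | cons a s =>
      have hax : a ≠ x := hd a s hdd
      simp only [List.nil_append]
      rw [pvChainOk_cons_of_ne x a s (fun h => hax h.symm)]
      simp
  | [b] =>
    have hbx : b = x := hall b (by simp)
    rw [hbx]
    cases hdd : d with
    | nil => simp [pvChainOk]
    | cons a s =>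
      have hax : a ≠ x := hd a s hdd
      simp only [List.singleton_append]
      have h1 : pvChainOk (x :: x :: a :: s) =
          ((decide (x ≠ x) || decide (x ≠ a)) && pvChainOk (x :: a :: s)) := rfl
      rw [h1, pvChainOk_cons_of_ne x a s (fun h => hax h.symm)]
      have hxa : x ≠ a := fun h => hax h.symm
      simp [hxa]
  | b :: c :: t' =>
    have hbx : b = x := hall b (by simp)
    have hcx : c = x := hall c (by simp)
    rw [hbx, hcx]
    simp only [List.cons_append]
    have h1 : pvChainOk (x :: x :: x :: (t' ++ d)) = false := by simp [pvChainOk]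
    rw [h1]
    simp
    omega

-- chains: no three consecutive equal iff every run is shorter than 3
theorem pv_chain_runs (u : List Int) :
    pvChainOk u = (pvRuns u).all (fun p => decide (p.2 < 3)) := by
  match u with
  | [] => simp [pvRuns_nil, pvChainOk]
  | x :: r =>
    have ih := pv_chain_runs (r.dropWhile (fun y => y == x))
    have hall : ∀ b ∈ r.takeWhile (fun y => y == x), b = x := fun b hb => by
      simpa using List.mem_takeWhile_imp hb
    have hdh : ∀ a s, r.dropWhile (fun y => y == x) = a :: s → a ≠ x :=
      fun a s h => pv_dropWhile_head x a r s h
    rw [pvRuns_cons,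
        show (x :: r) = x :: ((r.takeWhile (fun y => y == x)) ++ (r.dropWhile (fun y => y == x)))
          from by rw [List.takeWhile_append_dropWhile],
        pv_chain_split x _ _ hall hdh]
    simp [ih]
termination_by u.length
decreasing_by
  have := List.length_dropWhile_le (fun y => y == x) r
  simp; omega

theorem pvUnit_eq (half : Int) (u : List Int) : pvIsValidUnitA half u = pvOkB half u := by
  unfold pvIsValidUnitA pvOkB
  rw [pvIdxAll_eq_chainOk, pv_chain_runs]
  have h0 : PySem.List.count u 0 = pvSumFor 0 (pvRuns u) := by
    rw [show PySem.List.count u (0 : Int) = u.count 0 from rfl, pv_count_runs]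
  have h1 : PySem.List.count u 1 = pvSumFor 1 (pvRuns u) := by
    rw [show PySem.List.count u (1 : Int) = u.count 1 from rfl, pv_count_runs]
  rw [h0, h1]
  cases hA : (pvRuns u).all (fun p => decide (p.2 < 3)) <;>
    cases hc0 : decide ((pvSumFor 0 (pvRuns u) : Int) ≤ half) <;>
    cases hc1 : decide ((pvSumFor 1 (pvRuns u) : Int) ≤ half) <;>
    simp [hA, hc0, hc1]

-- ===== VERDICT =====
theorem is_valid_hitori_spec : Claim_equal_is_valid_hitori := by
  intro board _
  unfold Spec_is_valid_hitori is_valid_hitori is_valid_hitori_alt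
  simp only [pvUnit_eq, List.all_append, List.all_map]
  cases hb : board.all (fun u => pvOkB (PySem.Int.floordiv (board.length : Int) 2) u) <;>
    cases hc : (List.range (pvNcols board)).all
        (fun j => pvOkB (PySem.Int.floordiv (board.length : Int) 2) (pvColAt board j)) <;>
    simp_all [Function.comp]
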